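-- pv_equiv track=rewrite | github.com/hypertseng/bitfly | scripts/benchmarks/bmpmm_cost_model.py | pair_from_ord
-- ===== SOURCE A (Python) =====
-- from typing import Dict, Iterable, List, Tuple
--
-- def pair_from_ord(a_len: int, w_len: int, reuse_a: int, pair_ord: int) -> Tuple[int, int]:
--     ord_idx = 0
--     if reuse_a:
--         for a_pos in range(a_len):
--             if (a_pos & 1) == 0:
--                 for w_pos in range(w_len):
--                     if ord_idx == pair_ord:
--                         return a_pos, w_pos
--                     ord_idx += 1
--             else:
--                 for w_rev in range(w_len):
--                     w_pos = w_len - 1 - w_rev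
--                     if ord_idx == pair_ord:
--                         return a_pos, w_pos
--                     ord_idx += 1
--     else:
--         for w_pos in range(w_len):
--             if (w_pos & 1) == 0:
--                 for a_pos in range(a_len):
--                     if ord_idx == pair_ord:
--                         return a_pos, w_pos
--                     ord_idx += 1
--             else:
--                 for a_rev in range(a_len):
--                     a_pos = a_len - 1 - a_rev
--                     if ord_idx == pair_ord:
--                         return a_pos, w_pos
--                     ord_idx += 1
--     return 0, 0
-- ===== SOURCE B (Python) =====
-- def pair_from_ord(a_len: int, w_len: int, reuse_a: int, pair_ord: int):
--     # O(1) arithmetic: row = ordinal // row_length, odd rows are traversed reversed.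
--     outer, inner = (a_len, w_len) if reuse_a else (w_len, a_len)
--     if inner <= 0 or pair_ord < 0 or pair_ord >= outer * inner:
--         return (0, 0)
--     o, i = divmod(pair_ord, inner)
--     if o % 2 == 1:
--         i = inner - 1 - i
--     return (o, i) if reuse_a else (i, o)
-- ===== Notes on version B (the rewrite author's own statement) =====
-- stated objective: faster
-- what changed: Replaces the nested serpentine scan that counts ordinals one by one with closed-form divmod arithmetic (row = ord // row_length, column reversed on odd rows), with a range guard returning (0,0) exactly where the scan falls through.
import Mathlib
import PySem

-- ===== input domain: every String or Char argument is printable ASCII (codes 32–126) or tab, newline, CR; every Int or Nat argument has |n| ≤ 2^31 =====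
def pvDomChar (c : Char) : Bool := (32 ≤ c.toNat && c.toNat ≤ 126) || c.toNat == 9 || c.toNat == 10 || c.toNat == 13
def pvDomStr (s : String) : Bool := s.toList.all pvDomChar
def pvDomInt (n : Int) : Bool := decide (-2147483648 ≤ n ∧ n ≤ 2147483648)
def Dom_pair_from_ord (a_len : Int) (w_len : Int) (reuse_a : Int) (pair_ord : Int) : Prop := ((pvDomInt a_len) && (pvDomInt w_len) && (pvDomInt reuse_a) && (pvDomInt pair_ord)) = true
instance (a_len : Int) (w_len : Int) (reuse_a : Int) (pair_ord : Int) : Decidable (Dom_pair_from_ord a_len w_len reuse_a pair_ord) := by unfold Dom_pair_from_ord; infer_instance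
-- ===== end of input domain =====

-- B replaces A's element-by-element serpentine scan by divmod arithmetic (odd rows reversed) behind a range guard.


-- ===== PORT A =====
-- One inner `for` loop of A: scan index list `idxs` counting `ord_idx`; on hit, `return pos j`
-- (the early return is modelled by an Option that freezes the fold state).
def pfoLoop (pair_ord : Int) (pos : Int → Int × Int)
    (st : Int × Option (Int × Int)) (idxs : List Int) : Int × Option (Int × Int) :=
  idxs.foldl (fun st j =>
    match st.2 with
    | some _ => st
    | none => if st.1 = pair_ord then (st.1, some (pos j)) else (st.1 + 1, none)) st

def pair_from_ord (a_len : Int) (w_len : Int) (reuse_a : Int) (pair_ord : Int) : Int × Int :=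
  let res :=
    if reuse_a ≠ 0 then
      (PySem.List.pyRange 0 a_len 1).foldl (fun st a_pos =>
        if a_pos % 2 = 0 then
          pfoLoop pair_ord (fun w_pos => (a_pos, w_pos)) st (PySem.List.pyRange 0 w_len 1)
        else
          pfoLoop pair_ord (fun w_rev => (a_pos, w_len - 1 - w_rev)) st (PySem.List.pyRange 0 w_len 1)) ((0 : Int), (none : Option (Int × Int)))
    else
      (PySem.List.pyRange 0 w_len 1).foldl (fun st w_pos =>
        if w_pos % 2 = 0 then
          pfoLoop pair_ord (fun a_pos => (a_pos, w_pos)) st (PySem.List.pyRange 0 a_len 1)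
        else
          pfoLoop pair_ord (fun a_rev => (a_len - 1 - a_rev, w_pos)) st (PySem.List.pyRange 0 a_len 1)) ((0 : Int), (none : Option (Int × Int)))
  match res.2 with
  | some pr => pr
  | none => (0, 0)

-- ===== PORT B =====
def pair_from_ord_alt (a_len : Int) (w_len : Int) (reuse_a : Int) (pair_ord : Int) : Int × Int :=
  let outer := if reuse_a ≠ 0 then a_len else w_len
  let inner := if reuse_a ≠ 0 then w_len else a_len
  if inner ≤ 0 ∨ pair_ord < 0 ∨ outer * inner ≤ pair_ord then (0, 0)
  else
    let o := PySem.Int.floordiv pair_ord inner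
    let i0 := PySem.Int.mod pair_ord inner
    let i := if o % 2 = 1 then inner - 1 - i0 else i0
    if reuse_a ≠ 0 then (o, i) else (i, o)

-- ===== PRECONDITION & SPEC =====
def Spec_pair_from_ord (a_len : Int) (w_len : Int) (reuse_a : Int) (pair_ord : Int) (out : Int × Int) : Prop := out = pair_from_ord_alt a_len w_len reuse_a pair_ord
instance (a_len : Int) (w_len : Int) (reuse_a : Int) (pair_ord : Int) (out : Int × Int) : Decidable (Spec_pair_from_ord a_len w_len reuse_a pair_ord out) := by unfold Spec_pair_from_ord; infer_instance

-- ===== CLAIM (what is proved, stated in full; the proofs are below) =====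
def Claim_equal_pair_from_ord : Prop := ∀ (a_len : Int) (w_len : Int) (reuse_a : Int) (pair_ord : Int), Dom_pair_from_ord a_len w_len reuse_a pair_ord → Spec_pair_from_ord a_len w_len reuse_a pair_ord (pair_from_ord a_len w_len reuse_a pair_ord)

-- ===== LEMMAS AND PROOFS =====

theorem pfoLoop_some (p : Int) (pos : Int → Int × Int) (k : Int) (r : Int × Int)
    (idxs : List Int) : pfoLoop p pos (k, some r) idxs = (k, some r) := by
  induction idxs with
  | nil => rfl
  | cons x xs ih => simpa [pfoLoop, List.foldl] using ih

theorem pfoLoop_none (p : Int) (pos : Int → Int × Int) (idxs : List Int) :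
    ∀ k : Int, pfoLoop p pos (k, none) idxs =
      if k ≤ p ∧ p < k + idxs.length then (p, some (pos (idxs.getD (p - k).toNat 0)))
      else (k + idxs.length, none) := by
  induction idxs with
  | nil =>
    intro k
    simp only [pfoLoop, List.foldl, List.length_nil, Nat.cast_zero, add_zero]
    rw [if_neg (by omega)]
  | cons x xs ih =>
    intro k
    have hstep : pfoLoop p pos (k, none) (x :: xs) =
        pfoLoop p pos (if k = p then (k, some (pos x)) else (k + 1, none)) xs := by
      simp only [pfoLoop, List.foldl]
    by_cases hk : k = p
    · rw [hstep, if_pos hk, hk, pfoLoop_some]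
      rw [if_pos (by refine ⟨le_refl p, ?_⟩; simp only [List.length_cons]; push_cast; omega)]
      simp
    · rw [hstep, if_neg hk, ih (k + 1)]
      by_cases h1 : k + 1 ≤ p ∧ p < k + 1 + (xs.length : Int)
      · rw [if_pos h1, if_pos (by refine ⟨by omega, ?_⟩; simp only [List.length_cons]; push_cast; omega)]
        have hidx : (p - k).toNat = (p - (k + 1)).toNat + 1 := by omega
        rw [hidx]
        simp [List.getD]
      · rw [if_neg h1, if_neg (by simp only [List.length_cons]; push_cast; omega)]
        simp only [List.length_cons, Nat.cast_add, Nat.cast_one]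
        congr 1
        ring

theorem getD_pyRange (w : Int) (j : Nat) (h : j < w.toNat) :
    (PySem.List.pyRange 0 w 1).getD j 0 = (j : Int) := by
  rw [List.getD_eq_getElem _ _ (by simpa [PySem.List.length_pyRange_one] using h)]
  simp [PySem.List.getElem_pyRange_one]

theorem pyRange_toNat (a : Int) :
    PySem.List.pyRange 0 a 1 = PySem.List.pyRange 0 (a.toNat : Int) 1 := by
  have h : (a - 0).toNat = ((a.toNat : Int) - 0).toNat := by omega
  rw [PySem.List.pyRange_one, PySem.List.pyRange_one, h]

-- Closed form for the whole serpentine scan: rows indexed 0..n-1 (even rows use posE, odd posO),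
-- each row of length w.toNat.
theorem outer_loop (w p : Int) (posE posO : Int → Int → Int × Int) :
    ∀ n : Nat,
    (PySem.List.pyRange 0 (n : Int) 1).foldl (fun st r =>
        if r % 2 = 0 then pfoLoop p (posE r) st (PySem.List.pyRange 0 w 1)
        else pfoLoop p (posO r) st (PySem.List.pyRange 0 w 1)) ((0 : Int), (none : Option (Int × Int)))
    = if 0 ≤ p ∧ p < (↑(n * w.toNat) : Int) then
        (p, some (if (p.toNat / w.toNat) % 2 = 0
                  then posE ((p.toNat / w.toNat : Nat) : Int) ((p.toNat % w.toNat : Nat) : Int)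
                  else posO ((p.toNat / w.toNat : Nat) : Int) ((p.toNat % w.toNat : Nat) : Int)))
      else ((↑(n * w.toNat) : Int), none) := by
  intro n
  induction n with
  | zero => simp [PySem.List.pyRange_one]
  | succ n ih =>
    have hsplit : PySem.List.pyRange 0 ((↑(n + 1) : Int)) 1
        = PySem.List.pyRange 0 (n : Int) 1 ++ [(n : Int)] := by
      have : ((↑(n + 1) : Int)) = (n : Int) + 1 := by push_cast; ring
      rw [this, PySem.List.pyRange_one_succ_right (by positivity)]
    rw [hsplit, List.foldl_append, ih]
    by_cases h1 : 0 ≤ p ∧ p < (↑(n * w.toNat) : Int)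
    · rw [if_pos h1]
      have h2 : 0 ≤ p ∧ p < (↑((n + 1) * w.toNat) : Int) := by
        constructor; · exact h1.1
        · have : (n * w.toNat : Nat) ≤ ((n + 1) * w.toNat : Nat) := by
            apply Nat.mul_le_mul_right; omega
          have := h1.2; omega
      rw [if_pos h2]
      simp only [List.foldl]
      split_ifs <;> rw [pfoLoop_some]
    · rw [if_neg h1]
      simp only [List.foldl]
      have hlen : ((PySem.List.pyRange 0 w 1).length : Int) = (↑w.toNat : Int) := by
        simp [PySem.List.length_pyRange_one]
      by_cases h2 : 0 ≤ p ∧ p < (↑((n + 1) * w.toNat) : Int)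
      · -- p lies in row n
        have hsI : (↑((n + 1) * w.toNat) : Int) = (↑(n * w.toNat) : Int) + (↑w.toNat : Int) := by
          have hs : ((n + 1) * w.toNat : Nat) = n * w.toNat + w.toNat := by ring
          rw [hs]; push_cast; ring
        have hrow : (↑(n * w.toNat) : Int) ≤ p ∧ p < (↑(n * w.toNat) : Int) + (↑w.toNat : Int) := by
          constructor
          · by_contra hc; exact h1 ⟨h2.1, by omega⟩
          · omega
        have hkey1 : n * w.toNat ≤ p.toNat := by omega
        have hkey2 : p.toNat < n * w.toNat + w.toNat := by omega
        have hq : p.toNat / w.toNat = n :=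
          Nat.div_eq_of_lt_le hkey1 (by calc p.toNat < n * w.toNat + w.toNat := hkey2
                                          _ = (n + 1) * w.toNat := by ring)
        have hcInt : ((p.toNat % w.toNat : Nat) : Int) = p - (↑(n * w.toNat) : Int) := by
          have h := Nat.mod_add_div p.toNat w.toNat
          rw [hq] at h
          have h' : p.toNat % w.toNat + n * w.toNat = p.toNat := by
            rw [Nat.mul_comm n w.toNat]; omega
          omega
        have hidx : (p - (↑(n * w.toNat) : Int)).toNat < w.toNat := by omega
        have hgetD : (PySem.List.pyRange 0 w 1).getD (p - (↑(n * w.toNat) : Int)).toNat 0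
            = p - (↑(n * w.toNat) : Int) := by
          rw [getD_pyRange w _ hidx]; omega
        rw [if_pos h2]
        have hpar : ((n : Int) % 2 = 0) ↔ (n % 2 = 0) := by omega
        by_cases hpe : n % 2 = 0
        · rw [if_pos (hpar.mpr hpe)]
          rw [pfoLoop_none p _ _ (↑(n * w.toNat) : Int)]
          rw [if_pos (by rw [hlen]; exact hrow), hgetD]
          rw [hq, if_pos hpe, hcInt]
        · rw [if_neg (fun h => hpe (hpar.mp h))]
          rw [pfoLoop_none p _ _ (↑(n * w.toNat) : Int)]
          rw [if_pos (by rw [hlen]; exact hrow), hgetD]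
          rw [hq, if_neg hpe, hcInt]
      · -- p outside the whole grid
        rw [if_neg h2]
        have hs : (↑((n + 1) * w.toNat) : Int) = (↑(n * w.toNat) : Int) + (↑w.toNat : Int) := by
          have hs' : ((n + 1) * w.toNat : Nat) = n * w.toNat + w.toNat := by ring
          rw [hs']; push_cast; ring
        have hout : ¬ ((↑(n * w.toNat) : Int) ≤ p ∧ p < (↑(n * w.toNat) : Int) + ((PySem.List.pyRange 0 w 1).length : Int)) := by
          rw [hlen]; intro hcon
          exact h2 ⟨by omega, by omega⟩
        split_ifs <;>
          · rw [pfoLoop_none p _ _ (↑(n * w.toNat) : Int), if_neg hout, hlen]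
            try rw [hs]

-- Range-guard equivalence: A's "fell through without a hit" condition vs B's guard.
theorem guard_iff (o i p : Int) :
    (0 ≤ p ∧ p < (↑(o.toNat * i.toNat) : Int)) ↔ ¬ (i ≤ 0 ∨ p < 0 ∨ o * i ≤ p) := by
  by_cases hi : i ≤ 0
  · simp only [hi, true_or, not_true_eq_false, iff_false, not_and, not_lt]
    intro hp
    have : i.toNat = 0 := by omega
    simpa [this] using hp
  · by_cases ho : o ≤ 0
    · have h0 : o * i ≤ 0 := mul_nonpos_of_nonpos_of_nonneg ho (by omega)
      have h0' : o.toNat = 0 := by omega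
      simp [h0']; omega
    · have he : (↑(o.toNat * i.toNat) : Int) = o * i := by
        push_cast; rw [Int.toNat_of_nonneg (by omega), Int.toNat_of_nonneg (by omega)]
      rw [he]
      generalize o * i = P
      omega

-- In-range: B's divmod equals the scan's row/column in Nat terms.
theorem divmod_cast (p i : Int) (hp : 0 ≤ p) (hi : 0 < i) :
    PySem.Int.floordiv p i = ((p.toNat / i.toNat : Nat) : Int) ∧
    PySem.Int.mod p i = ((p.toNat % i.toNat : Nat) : Int) := by
  have hpc : p = ((p.toNat : Nat) : Int) := by omega
  have hic : i = ((i.toNat : Nat) : Int) := by omega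
  rw [hpc, hic]
  exact ⟨PySem.Int.floordiv_natCast _ _, PySem.Int.mod_natCast _ _⟩

theorem pair_from_ord_spec : Claim_equal_pair_from_ord := by
  intro a_len w_len reuse_a pair_ord _
  unfold Spec_pair_from_ord pair_from_ord pair_from_ord_alt
  by_cases hr : reuse_a ≠ 0
  · simp only [if_pos hr]
    rw [pyRange_toNat a_len,
      outer_loop w_len pair_ord (fun r j => (r, j)) (fun r j => (r, w_len - 1 - j)) a_len.toNat]
    by_cases hin : 0 ≤ pair_ord ∧ pair_ord < (↑(a_len.toNat * w_len.toNat) : Int)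
    · rw [if_pos hin, if_neg (show ¬ (w_len ≤ 0 ∨ pair_ord < 0 ∨ a_len * w_len ≤ pair_ord) from (guard_iff a_len w_len pair_ord).mp hin)]
      have hw : 0 < w_len := by
        by_contra hw
        have : w_len.toNat = 0 := by omega
        simp [this] at hin; omega
      obtain ⟨hd, hm⟩ := divmod_cast pair_ord w_len hin.1 hw
      rw [hd, hm]
      have hpar : (((pair_ord.toNat / w_len.toNat : Nat) : Int) % 2 = 1)
          ↔ ¬ ((pair_ord.toNat / w_len.toNat) % 2 = 0) := by omega
      by_cases hq : (pair_ord.toNat / w_len.toNat) % 2 = 0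
      · rw [if_pos hq, if_neg (fun hcon => (hpar.mp hcon) hq)]
      · rw [if_neg hq, if_pos (hpar.mpr hq)]
    · rw [if_neg hin, if_pos (show (w_len ≤ 0 ∨ pair_ord < 0 ∨ a_len * w_len ≤ pair_ord) by
        by_contra hc; exact hin ((guard_iff a_len w_len pair_ord).mpr hc))]
  · simp only [if_neg hr]
    rw [pyRange_toNat w_len,
      outer_loop a_len pair_ord (fun r j => (j, r)) (fun r j => (a_len - 1 - j, r)) w_len.toNat]
    by_cases hin : 0 ≤ pair_ord ∧ pair_ord < (↑(w_len.toNat * a_len.toNat) : Int)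
    · rw [if_pos hin, if_neg (show ¬ (a_len ≤ 0 ∨ pair_ord < 0 ∨ w_len * a_len ≤ pair_ord) from (guard_iff w_len a_len pair_ord).mp hin)]
      have ha : 0 < a_len := by
        by_contra ha
        have : a_len.toNat = 0 := by omega
        simp [this] at hin; omega
      obtain ⟨hd, hm⟩ := divmod_cast pair_ord a_len hin.1 ha
      rw [hd, hm]
      have hpar : (((pair_ord.toNat / a_len.toNat : Nat) : Int) % 2 = 1)
          ↔ ¬ ((pair_ord.toNat / a_len.toNat) % 2 = 0) := by omega
      by_cases hq : (pair_ord.toNat / a_len.toNat) % 2 = 0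
      · rw [if_pos hq, if_neg (fun hcon => (hpar.mp hcon) hq)]
      · rw [if_neg hq, if_pos (hpar.mpr hq)]
    · rw [if_neg hin, if_pos (show (a_len ≤ 0 ∨ pair_ord < 0 ∨ w_len * a_len ≤ pair_ord) by
        by_contra hc; exact hin ((guard_iff w_len a_len pair_ord).mpr hc))]
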